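-- pv_equiv track=rewrite | github.com/leeheejae91/AlgoPrj_Python | land/land.py | solution
-- ===== SOURCE A (Python) =====
-- def solution(land):
--     answer = 0
--     for i in range(len(land)):
--         if i == 0 :
--             continue
--
--         for j in range(len(land[i])):
--             land[i][j] = land[i][j] + max([ land[i-1][k] if k != j else 0 for k in range(len(land[i]))])
--
--     return max(land[len(land)-1])
-- ===== SOURCE B (Python) =====
-- def solution(land):
--     # O(n*m): per row, one scan computing the top-two running maxima (floored at 0,
--     # matching the 0 that replaces the excluded column) of the previous DP row,
--     # instead of a fresh O(m) max for every column.  Does not mutate `land`.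
--     prev = land[0]
--     for row in land[1:]:
--         best1 = best2 = 0
--         idx = -1
--         for k in range(len(row)):
--             v = prev[k]
--             if v > best1:
--                 best1, best2, idx = v, best1, k
--             elif v > best2:
--                 best2 = v
--         prev = [v + (best2 if j == idx else best1) for j, v in enumerate(row)]
--     return max(prev)
-- ===== Notes on version B (the rewrite author's own statement) =====
-- stated objective: faster
-- what changed: Replaces the per-cell O(m) max-of-previous-row scan with a single top-two-maxima (floored at 0) pass per row, turning the DP step from O(m^2) into O(m); B does not mutate its argument; Pre_ excludes ragged inputs where a row is wider than its predecessor (A usually raises IndexError there, except when the widened row has width 1, where A's comprehension never reads the missing cell and returns while B naturally raises).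
-- outside the precondition, e.g. on solution([[], [0]]): A returns 0, B raises IndexError
import Mathlib
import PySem

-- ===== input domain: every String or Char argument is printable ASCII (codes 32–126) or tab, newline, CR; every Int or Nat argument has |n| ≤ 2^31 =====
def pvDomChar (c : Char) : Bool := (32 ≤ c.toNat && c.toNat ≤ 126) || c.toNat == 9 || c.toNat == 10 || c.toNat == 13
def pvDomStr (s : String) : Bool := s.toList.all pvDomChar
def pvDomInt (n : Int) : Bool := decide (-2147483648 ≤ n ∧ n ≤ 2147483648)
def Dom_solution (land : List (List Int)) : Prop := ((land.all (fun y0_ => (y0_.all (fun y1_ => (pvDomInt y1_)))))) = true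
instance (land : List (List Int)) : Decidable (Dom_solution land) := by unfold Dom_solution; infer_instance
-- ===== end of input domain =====

-- B replaces A's per-cell O(m) max scan by one top-two-maxima pass per row (O(n*m) instead of
-- O(n*m^2)); A mutates `land` in place, B does not — the equivalence proved is about the return value.

-- ===== PORT A =====
-- literal port of Source A (the dead `answer = 0` is dropped; nested mutation land[i][j] = … is pySetD)
def solution (land : List (List Int)) : Int :=
  let land2 := (PySem.List.pyRange 0 (land.length : Int) 1).foldl (fun L i =>
    if i = 0 then L
    else
      (PySem.List.pyRange 0 ((PySem.List.pyGetD L i []).length : Int) 1).foldl (fun L' j =>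
        let cand := (PySem.List.pyRange 0 ((PySem.List.pyGetD L' i []).length : Int) 1).map
          (fun k => if k ≠ j then PySem.List.pyGetD (PySem.List.pyGetD L' (i-1) []) k 0 else 0)
        let row := PySem.List.pyGetD L' i []
        PySem.List.pySetD L' i (PySem.List.pySetD row j
          (PySem.List.pyGetD row j 0 + (PySem.List.max? cand (fun x => x)).getD 0))) L) land
  (PySem.List.max? (PySem.List.pyGetD land2 ((land2.length : Int) - 1) []) (fun x => x)).getD 0

-- ===== PORT B =====
-- literal port of Source B
def solution_alt (land : List (List Int)) : Int :=
  let last := (PySem.List.slice land (some 1) none).foldl (fun prev row =>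
    let s := (PySem.List.pyRange 0 (row.length : Int) 1).foldl
      (fun (s : Int × Int × Int) k =>
        let v := PySem.List.pyGetD prev k 0
        if v > s.1 then (v, s.1, k) else if v > s.2.1 then (s.1, v, s.2.2) else s)
      (0, 0, -1)
    (PySem.List.enumerate row).map (fun p => p.2 + (if p.1 = s.2.2 then s.2.1 else s.1)))
    (PySem.List.pyGetD land 0 [])
  (PySem.List.max? last (fun x => x)).getD 0

-- ===== PRECONDITION & SPEC =====
-- Pre_ excludes the inputs where A raises (empty land, empty last row, a row wider than its
-- predecessor, whose max-comprehension reads a missing cell of the previous row -> IndexError)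
-- and the corner where a row widens to width exactly 1 over a shorter previous row, on which A
-- still returns (its single column is the excluded one, replaced by 0, so the missing cell is
-- never read) while B naturally raises reading prev[0].
def Pre_solution (land : List (List Int)) : Prop :=
  land ≠ [] ∧ land.getLastD [] ≠ [] ∧ List.IsChain (fun a b => b.length ≤ a.length) land
instance (land : List (List Int)) : Decidable (Pre_solution land) := by
  unfold Pre_solution; infer_instance
def pvWitness_solution : List (List Int) := [[1, 2, 3], [4, 5, 6], [7, 8, 9]]
def Spec_solution (land : List (List Int)) (out : Int) : Prop := out = solution_alt land
instance (land : List (List Int)) (out : Int) : Decidable (Spec_solution land out) := by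
  unfold Spec_solution; infer_instance

-- ===== CLAIM (what is proved, stated in full; the proofs are below) =====
def Claim_equal_solution : Prop :=
  ∀ (land : List (List Int)), Dom_solution land → Pre_solution land →
    Spec_solution land (solution land)

-- ===== LEMMAS AND PROOFS =====

-- A's inner max expression: max over column k < m of (prev[k] if k != j else 0).
def aval (prev : List Int) (m : Nat) (j : Int) : Int :=
  (PySem.List.max? ((PySem.List.pyRange 0 (m : Int) 1).map
    (fun k => if k ≠ j then PySem.List.pyGetD prev k 0 else 0)) (fun x => x)).getD 0

-- the common DP step and full DP, reference form for both ports
def dpRow (prev row : List Int) : List Int :=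
  (PySem.List.enumerate row).map (fun p => p.2 + aval prev row.length p.1)

def dpList (land : List (List Int)) : List Int :=
  (land.drop 1).foldl dpRow (land.headD [])

-- value-level running maxima
def fm (prev : List Int) (m : Nat) : Int :=
  ((PySem.List.pyRange 0 (m : Int) 1).map (fun k => PySem.List.pyGetD prev k 0)).foldl max 0

def mx (prev : List Int) (m : Nat) (j : Int) : Int :=
  ((PySem.List.pyRange 0 (m : Int) 1).map
    (fun k => if k ≠ j then PySem.List.pyGetD prev k 0 else 0)).foldl max 0

theorem foldl_max_base (t : List Int) (a b : Int) :
    t.foldl max (max a b) = max (t.foldl max a) b := by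
  induction t generalizing a with
  | nil => rfl
  | cons x t ih =>
    simp only [List.foldl_cons]
    rw [max_right_comm, ih]

theorem max_getD_eq_foldl (l : List Int) (h : (0:Int) ∈ l) :
    (PySem.List.max? l (fun x => x)).getD 0 = l.foldl max 0 := by
  cases l with
  | nil => simp at h
  | cons x t =>
    rw [PySem.List.max?_id_cons]
    simp only [Option.getD_some, List.foldl_cons]
    have hnn : 0 ≤ t.foldl max x := by
      rcases List.mem_cons.1 h with h0 | h0
      · exact h0 ▸ (PySem.List.le_foldl_max t x).1
      · exact (PySem.List.le_foldl_max t x).2 0 h0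
    rw [max_comm 0 x, foldl_max_base, max_eq_left hnn]

theorem aval_eq_mx (prev : List Int) (m : Nat) (j : Int) (h0 : 0 ≤ j) (hm : j < (m : Int)) :
    aval prev m j = mx prev m j := by
  have hjmem : j ∈ PySem.List.pyRange 0 (m : Int) 1 :=
    (PySem.List.mem_pyRange_one).2 ⟨h0, hm⟩
  exact max_getD_eq_foldl _ (List.mem_map.2 ⟨j, hjmem, by simp⟩)

theorem mx_oob (prev : List Int) (m : Nat) (j : Int) (hj : (m : Int) ≤ j) :
    mx prev m j = fm prev m := by
  unfold mx fm
  congr 1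
  refine List.map_congr_left ?_
  intro k hk
  obtain ⟨_, hk2⟩ := (PySem.List.mem_pyRange_one).1 hk
  rw [if_pos (by omega : k ≠ j)]

-- top-two state after scanning the first m columns (B's inner loop)
def ttStep (prev : List Int) (s : Int × Int × Int) (k : Int) : Int × Int × Int :=
  let v := PySem.List.pyGetD prev k 0
  if v > s.1 then (v, s.1, k) else if v > s.2.1 then (s.1, v, s.2.2) else s

def tt (prev : List Int) (m : Nat) : Int × Int × Int :=
  (PySem.List.pyRange 0 (m : Int) 1).foldl (ttStep prev) (0, 0, -1)

theorem fm_succ (prev : List Int) (m : Nat) :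
    fm prev (m + 1) = max (fm prev m) (PySem.List.pyGetD prev (m : Int) 0) := by
  unfold fm
  rw [show ((m + 1 : Nat) : Int) = (m : Int) + 1 by push_cast; ring,
      PySem.List.pyRange_one_succ_right (Int.natCast_nonneg m),
      List.map_append, List.foldl_append]
  rfl

theorem mx_succ (prev : List Int) (m : Nat) (j : Int) :
    mx prev (m + 1) j = max (mx prev m j)
      (if (m : Int) ≠ j then PySem.List.pyGetD prev (m : Int) 0 else 0) := by
  unfold mx
  rw [show ((m + 1 : Nat) : Int) = (m : Int) + 1 by push_cast; ring,
      PySem.List.pyRange_one_succ_right (Int.natCast_nonneg m),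
      List.map_append, List.foldl_append]
  rfl

theorem tt_succ (prev : List Int) (m : Nat) :
    tt prev (m + 1) = ttStep prev (tt prev m) (m : Int) := by
  unfold tt
  rw [show ((m + 1 : Nat) : Int) = (m : Int) + 1 by push_cast; ring,
      PySem.List.pyRange_one_succ_right (Int.natCast_nonneg m),
      List.foldl_append]
  rfl

def ttInv (prev : List Int) (m : Nat) (s : Int × Int × Int) : Prop :=
  0 ≤ s.2.1 ∧ s.2.1 ≤ s.1 ∧ s.1 = fm prev m ∧
  (∀ k : Nat, k < m → PySem.List.pyGetD prev (k : Int) 0 ≤ s.1) ∧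
  (s.2.2 = -1 → s.1 = 0 ∧ s.2.1 = 0) ∧
  (s.2.2 ≠ -1 → 0 ≤ s.2.2 ∧ s.2.2 < (m : Int) ∧
    PySem.List.pyGetD prev s.2.2 0 = s.1 ∧ s.2.1 = mx prev m s.2.2)

theorem tt_inv (prev : List Int) (m : Nat) : ttInv prev m (tt prev m) := by
  induction m with
  | zero =>
    refine ⟨le_refl 0, le_refl 0, rfl, fun k hk => absurd hk (Nat.not_lt_zero k),
      fun _ => ⟨rfl, rfl⟩, fun h => absurd rfl h⟩
  | succ m ih =>
    obtain ⟨h1, h2, h3, h4, h5, h6⟩ := ih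
    rw [tt_succ]
    set s := tt prev m with hs
    set v := PySem.List.pyGetD prev (m : Int) 0 with hv
    unfold ttStep
    rw [← hv]
    by_cases hc1 : v > s.1
    · -- new best column m: state becomes (v, s.1, m)
      simp only [if_pos hc1]
      refine ⟨le_trans h1 h2, le_of_lt hc1, ?_, ?_, ?_, ?_⟩
      · rw [fm_succ, ← h3, ← hv, max_eq_right (le_of_lt hc1)]
      · intro k hk
        rcases Nat.lt_succ_iff_lt_or_eq.1 hk with hk' | hk'
        · exact le_trans (h4 k hk') (le_of_lt hc1)
        · subst hk'; exact le_of_eq rfl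
      · intro habs
        exfalso
        have hm1 : (m : Int) = -1 := habs
        omega
      · intro _
        refine ⟨Int.natCast_nonneg m, by push_cast; omega, rfl, ?_⟩
        rw [mx_succ, if_neg (by simp), mx_oob prev m (m : Int) le_rfl, ← h3]
        rw [max_eq_left (le_trans h1 h2)]
    · by_cases hc2 : v > s.2.1
      · -- new runner-up: state becomes (s.1, v, s.2.2)
        simp only [if_neg hc1, if_pos hc2]
        by_cases hid : s.2.2 = -1
        · obtain ⟨hb1, hb2⟩ := h5 hid
          exfalso; rw [hb2] at hc2; rw [hb1] at hc1; omega
        · obtain ⟨hi1, hi2, hi3, hi4⟩ := h6 hid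
          refine ⟨le_trans h1 (le_of_lt hc2), not_lt.1 hc1, ?_, ?_, ?_, ?_⟩
          · rw [fm_succ, ← h3, ← hv, max_eq_left (not_lt.1 hc1)]
          · intro k hk
            rcases Nat.lt_succ_iff_lt_or_eq.1 hk with hk' | hk'
            · exact h4 k hk'
            · subst hk'; exact not_lt.1 hc1
          · intro habs; exact absurd habs hid
          · intro _
            refine ⟨hi1, lt_trans hi2 (by push_cast; omega), hi3, ?_⟩
            rw [mx_succ, ← hi4, if_pos (by omega : (m : Int) ≠ s.2.2), ← hv]
            exact (max_eq_right (le_of_lt hc2)).symm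
      · -- state unchanged
        simp only [if_neg hc1, if_neg hc2]
        refine ⟨h1, h2, ?_, ?_, h5, ?_⟩
        · rw [fm_succ, ← h3, ← hv, max_eq_left (not_lt.1 hc1)]
        · intro k hk
          rcases Nat.lt_succ_iff_lt_or_eq.1 hk with hk' | hk'
          · exact h4 k hk'
          · subst hk'; exact not_lt.1 hc1
        · intro hid
          obtain ⟨hi1, hi2, hi3, hi4⟩ := h6 hid
          refine ⟨hi1, lt_trans hi2 (by push_cast; omega), hi3, ?_⟩
          rw [mx_succ, ← hi4, if_pos (by omega : (m : Int) ≠ s.2.2), ← hv]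
          exact (max_eq_left (not_lt.1 hc2)).symm

theorem tt_sel (prev : List Int) (m : Nat) (j : Int) (h0 : 0 ≤ j) (hm : j < (m : Int)) :
    (if j = (tt prev m).2.2 then (tt prev m).2.1 else (tt prev m).1) = aval prev m j := by
  obtain ⟨h1, h2, h3, h4, h5, h6⟩ := tt_inv prev m
  rw [aval_eq_mx prev m j h0 hm]
  by_cases hj : j = (tt prev m).2.2
  · rw [if_pos hj]
    have hid : (tt prev m).2.2 ≠ -1 := by omega
    obtain ⟨_, _, _, hv⟩ := h6 hid
    rw [hv, hj]
  · rw [if_neg hj]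
    have hball : ∀ y ∈ ((PySem.List.pyRange 0 (m : Int) 1).map
        (fun k => if k ≠ j then PySem.List.pyGetD prev k 0 else 0)), y ≤ (tt prev m).1 := by
      intro y hy
      obtain ⟨k, hk, rfl⟩ := List.mem_map.1 hy
      obtain ⟨hk0, hkm⟩ := (PySem.List.mem_pyRange_one).1 hk
      by_cases hkj : k ≠ j
      · rw [if_pos hkj]
        have hcast : k = ((k.toNat : Nat) : Int) := by omega
        rw [hcast]
        exact h4 k.toNat (by omega)
      · rw [if_neg hkj]; exact le_trans h1 h2
    have hle : mx prev m j ≤ (tt prev m).1 := by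
      rcases PySem.List.foldl_max_mem ((PySem.List.pyRange 0 (m : Int) 1).map
        (fun k => if k ≠ j then PySem.List.pyGetD prev k 0 else 0)) 0 with h | h
      · exact le_trans (le_of_eq (show mx prev m j = 0 from h)) (le_trans h1 h2)
      · exact hball _ h
    by_cases hid : (tt prev m).2.2 = -1
    · obtain ⟨hb1, hb2⟩ := h5 hid
      have hge : 0 ≤ mx prev m j := (PySem.List.le_foldl_max _ 0).1
      omega
    · obtain ⟨hi1, hi2, hi3, _⟩ := h6 hid
      have hmem : (tt prev m).1 ∈ ((PySem.List.pyRange 0 (m : Int) 1).map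
          (fun k => if k ≠ j then PySem.List.pyGetD prev k 0 else 0)) := by
        refine List.mem_map.2 ⟨(tt prev m).2.2, (PySem.List.mem_pyRange_one).2 ⟨hi1, hi2⟩, ?_⟩
        rw [if_pos (by omega : (tt prev m).2.2 ≠ j), hi3]
      have hge : (tt prev m).1 ≤ mx prev m j := (PySem.List.le_foldl_max _ 0).2 _ hmem
      omega

theorem stepB_eq_dpRow (prev row : List Int) :
    ((PySem.List.enumerate row).map
      (fun p => p.2 + (if p.1 = (tt prev row.length).2.2
                       then (tt prev row.length).2.1 else (tt prev row.length).1)))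
      = dpRow prev row := by
  unfold dpRow
  refine List.map_congr_left ?_
  intro p hp
  obtain ⟨k, hk, rfl⟩ := (PySem.List.mem_enumerate_iff row 0 p).1 hp
  simp only
  rw [tt_sel prev row.length (0 + k) (by omega) (by omega)]

theorem solution_alt_eq (land : List (List Int)) :
    solution_alt land = (PySem.List.max? (dpList land) (fun x => x)).getD 0 := by
  have hfun : (fun (prev row : List Int) =>
      let s := (PySem.List.pyRange 0 (row.length : Int) 1).foldl
        (fun (s : Int × Int × Int) k =>
          let v := PySem.List.pyGetD prev k 0
          if v > s.1 then (v, s.1, k) else if v > s.2.1 then (s.1, v, s.2.2) else s)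
        (0, 0, -1)
      (PySem.List.enumerate row).map (fun p => p.2 + (if p.1 = s.2.2 then s.2.1 else s.1)))
      = dpRow := by
    funext prev row
    exact stepB_eq_dpRow prev row
  show (PySem.List.max? ((PySem.List.slice land (some 1) none).foldl
      (fun (prev row : List Int) =>
        let s := (PySem.List.pyRange 0 (row.length : Int) 1).foldl
          (fun (s : Int × Int × Int) k =>
            let v := PySem.List.pyGetD prev k 0
            if v > s.1 then (v, s.1, k) else if v > s.2.1 then (s.1, v, s.2.2) else s)
          (0, 0, -1)
        (PySem.List.enumerate row).map (fun p => p.2 + (if p.1 = s.2.2 then s.2.1 else s.1)))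
      (PySem.List.pyGetD land 0 [])) (fun x => x)).getD 0
    = (PySem.List.max? (dpList land) (fun x => x)).getD 0
  rw [hfun, PySem.List.slice_from_one]
  unfold dpList
  cases land with
  | nil => rfl
  | cons a l =>
    simp only [List.tail_cons, List.drop_succ_cons, List.drop_zero, List.headD_cons]
    rw [show PySem.List.pyGetD (a :: l) 0 [] = a by
      rw [show (0 : Int) = ((0 : Nat) : Int) from rfl, PySem.List.pyGetD_natCast]; rfl]

-- ==== A-side: named forms of A's loop bodies ====
def innerA (i : Int) (L' : List (List Int)) (j : Int) : List (List Int) :=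
  let cand := (PySem.List.pyRange 0 ((PySem.List.pyGetD L' i []).length : Int) 1).map
    (fun k => if k ≠ j then PySem.List.pyGetD (PySem.List.pyGetD L' (i-1) []) k 0 else 0)
  let row := PySem.List.pyGetD L' i []
  PySem.List.pySetD L' i (PySem.List.pySetD row j
    (PySem.List.pyGetD row j 0 + (PySem.List.max? cand (fun x => x)).getD 0))

def stepA (L : List (List Int)) (i : Int) : List (List Int) :=
  if i = 0 then L
  else (PySem.List.pyRange 0 ((PySem.List.pyGetD L i []).length : Int) 1).foldl (innerA i) L

def rowStep (prev r : List Int) (j : Int) : List Int :=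
  PySem.List.pySetD r j (PySem.List.pyGetD r j 0 + aval prev r.length j)

theorem set_getD_self (L : List (List Int)) (ii : Nat) (h : ii < L.length) :
    PySem.List.pySetD L (ii : Int) (PySem.List.pyGetD L (ii : Int) []) = L := by
  rw [PySem.List.pySetD_natCast, PySem.List.pyGetD_natCast, List.getD_eq_getElem L [] h]
  apply List.ext_getElem
  · simp
  · intro i h1 h2
    rw [List.getElem_set]
    split_ifs with he
    · subst he; rfl
    · rfl

theorem innerA_eq (ii : Nat) (L : List (List Int)) (r : List Int) (j : Int)
    (h1 : 1 ≤ ii) (h2 : ii < L.length) :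
    innerA (ii : Int) (PySem.List.pySetD L (ii : Int) r) j
      = PySem.List.pySetD L (ii : Int)
          (rowStep (PySem.List.pyGetD L ((ii : Int) - 1) []) r j) := by
  unfold innerA rowStep aval
  have e1 : PySem.List.pyGetD (PySem.List.pySetD L (ii : Int) r) (ii : Int) [] = r := by
    rw [PySem.List.pyGetD_pySetD_natCast L ii ii r [] h2, if_pos rfl]
  have e2 : PySem.List.pyGetD (PySem.List.pySetD L (ii : Int) r) ((ii : Int) - 1) []
      = PySem.List.pyGetD L ((ii : Int) - 1) [] := by
    rw [show ((ii : Int) - 1) = ((ii - 1 : Nat) : Int) by omega,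
        PySem.List.pyGetD_pySetD_natCast L ii (ii - 1) r [] h2,
        if_neg (by omega)]
  rw [e1, e2, PySem.List.pySetD_natCast, PySem.List.pySetD_natCast, List.set_set,
      ← PySem.List.pySetD_natCast]

theorem innerfold_lift (js : List Int) (ii : Nat) (L : List (List Int)) (r : List Int)
    (h1 : 1 ≤ ii) (h2 : ii < L.length) :
    js.foldl (innerA (ii : Int)) (PySem.List.pySetD L (ii : Int) r)
      = PySem.List.pySetD L (ii : Int)
          (js.foldl (rowStep (PySem.List.pyGetD L ((ii : Int) - 1) [])) r) := by
  induction js generalizing r with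
  | nil => rfl
  | cons j js ih =>
    rw [List.foldl_cons, List.foldl_cons, innerA_eq ii L r j h1 h2, ih]

theorem length_dpRow (prev r : List Int) : (dpRow prev r).length = r.length := by
  unfold dpRow
  rw [List.length_map, PySem.List.length_enumerate]

theorem dpRow_getElem (prev r : List Int) (n : Nat) (h : n < r.length) :
    (dpRow prev r)[n]'(by rw [length_dpRow]; exact h)
      = r[n] + aval prev r.length (n : Int) := by
  unfold dpRow
  rw [List.getElem_map, PySem.List.getElem_enumerate]
  simp

theorem rowfold_eq (prev r : List Int) (n : Nat) (hn : n ≤ r.length) :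
    (PySem.List.pyRange 0 (n : Int) 1).foldl (rowStep prev) r
      = (dpRow prev r).take n ++ r.drop n := by
  induction n with
  | zero => simp [PySem.List.pyRange_one_eq_nil le_rfl]
  | succ n ih =>
    have hn' : n < r.length := hn
    have hlt : n < (dpRow prev r).length := by rw [length_dpRow]; exact hn'
    have htk : ((dpRow prev r).take n).length = n := by
      rw [List.length_take]; omega
    rw [show ((n + 1 : Nat) : Int) = (n : Int) + 1 by push_cast; ring,
        PySem.List.pyRange_one_succ_right (Int.natCast_nonneg n),
        List.foldl_append, ih (le_of_lt hn'), List.foldl_cons, List.foldl_nil,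
        List.drop_eq_getElem_cons hn']
    unfold rowStep
    have hlen : ((dpRow prev r).take n ++ r[n] :: r.drop (n + 1)).length = r.length := by
      rw [List.length_append, htk, List.length_cons, List.length_drop]
      omega
    have hget : PySem.List.pyGetD ((dpRow prev r).take n ++ r[n] :: r.drop (n + 1)) (n : Int) 0
        = r[n] := by
      rw [PySem.List.pyGetD_natCast,
          List.getD_eq_getElem _ _ (by rw [hlen]; omega),
          List.getElem_append_right (by omega)]
      simp [htk]
    rw [hlen, hget, PySem.List.pySetD_natCast, List.set_append, if_neg (by omega), htk,
        Nat.sub_self, List.set_cons_zero]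
    rw [List.take_add_one, List.getElem?_eq_getElem hlt, dpRow_getElem prev r n hn']
    simp

theorem rowfold_full (prev r : List Int) :
    (PySem.List.pyRange 0 (r.length : Int) 1).foldl (rowStep prev) r = dpRow prev r := by
  rw [rowfold_eq prev r r.length le_rfl, List.drop_length, List.append_nil,
      List.take_of_length_le (by rw [length_dpRow])]

theorem stepA_eq (L : List (List Int)) (ii : Nat) (h1 : 1 ≤ ii) (h2 : ii < L.length) :
    stepA L (ii : Int)
      = PySem.List.pySetD L (ii : Int)
          (dpRow (PySem.List.pyGetD L ((ii : Int) - 1) []) (PySem.List.pyGetD L (ii : Int) [])) := by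
  unfold stepA
  rw [if_neg (by omega : ¬ ((ii : Int) = 0))]
  conv_lhs => rw [show L = PySem.List.pySetD L (ii : Int) (PySem.List.pyGetD L (ii : Int) [])
    from (set_getD_self L ii h2).symm]
  rw [innerfold_lift _ ii L _ h1 h2]
  congr 1
  rw [show PySem.List.pyGetD (PySem.List.pySetD L (↑ii) (PySem.List.pyGetD L (↑ii) [])) (↑ii) []
        = PySem.List.pyGetD L (↑ii) [] by
      rw [PySem.List.pyGetD_pySetD_natCast L ii ii _ [] h2, if_pos rfl]]
  exact rowfold_full _ _

theorem dpList_take_succ (land : List (List Int)) (ii : Nat) (h1 : 1 ≤ ii)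
    (h2 : ii < land.length) :
    dpList (land.take (ii + 1))
      = dpRow (dpList (land.take ii)) (PySem.List.pyGetD land (ii : Int) []) := by
  have hx : PySem.List.pyGetD land (ii : Int) [] = land[ii] := by
    rw [PySem.List.pyGetD_natCast, List.getD_eq_getElem land [] h2]
  have htk : land.take (ii + 1) = land.take ii ++ [land[ii]] := by
    rw [List.take_add_one, List.getElem?_eq_getElem h2]; rfl
  have hlen : (land.take ii).length = ii := by rw [List.length_take]; omega
  have hne : land.take ii ≠ [] := by
    intro habs; rw [habs] at hlen; simp at hlen; omega
  unfold dpList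
  rw [htk, hx]
  rw [List.drop_append_of_le_length (by omega), List.foldl_append]
  cases htake : land.take ii with
  | nil => exact absurd htake hne
  | cons a l => simp

theorem outer_inv (land : List (List Int)) (ii : Nat) (hii : ii ≤ land.length) :
    ((PySem.List.pyRange 0 (ii : Int) 1).foldl stepA land).length = land.length ∧
    (∀ t : Nat, ii ≤ t →
      PySem.List.pyGetD ((PySem.List.pyRange 0 (ii : Int) 1).foldl stepA land) (t : Int) []
        = PySem.List.pyGetD land (t : Int) []) ∧
    (1 ≤ ii →
      PySem.List.pyGetD ((PySem.List.pyRange 0 (ii : Int) 1).foldl stepA land) ((ii : Int) - 1) []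
        = dpList (land.take ii)) := by
  induction ii with
  | zero =>
    rw [show ((0 : Nat) : Int) = 0 from rfl, PySem.List.pyRange_one_eq_nil le_rfl]
    exact ⟨rfl, fun t _ => rfl, fun habs => absurd habs (by omega)⟩
  | succ ii ih =>
    obtain ⟨g1, g2, g3⟩ := ih (by omega)
    rw [show ((ii + 1 : Nat) : Int) = (ii : Int) + 1 by push_cast; ring,
        PySem.List.pyRange_one_succ_right (Int.natCast_nonneg ii), List.foldl_append,
        List.foldl_cons, List.foldl_nil]
    set L := (PySem.List.pyRange 0 (ii : Int) 1).foldl stepA land with hL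
    by_cases hz : ii = 0
    · subst hz
      unfold stepA
      rw [if_pos (show ((0 : Nat) : Int) = 0 from rfl)]
      refine ⟨g1, fun t _ => g2 t (by omega), fun _ => ?_⟩
      rw [show ((0 : Nat) : Int) + 1 - 1 = ((0 : Nat) : Int) from by ring, g2 0 le_rfl]
      cases land with
      | nil => simp at hii
      | cons a l =>
        rw [show PySem.List.pyGetD (a :: l) ((0 : Nat) : Int) [] = a by
          rw [PySem.List.pyGetD_natCast]; rfl]
        rfl
    · have h1 : 1 ≤ ii := by omega
      have h2 : ii < L.length := by rw [g1]; omega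
      rw [stepA_eq L ii h1 h2, g2 ii le_rfl, g3 h1]
      refine ⟨by rw [PySem.List.length_pySetD]; exact g1, ?_, ?_⟩
      · intro t ht
        rw [PySem.List.pyGetD_pySetD_natCast L ii t _ [] h2, if_neg (by omega)]
        exact g2 t (by omega)
      · intro _
        rw [show ((ii : Int) + 1 - 1) = ((ii : Nat) : Int) by ring]
        rw [PySem.List.pyGetD_pySetD_natCast L ii ii _ [] h2, if_pos rfl]
        exact (dpList_take_succ land ii h1 (by omega)).symm

theorem solution_eq (land : List (List Int)) (h : land ≠ []) :
    solution land = (PySem.List.max? (dpList land) (fun x => x)).getD 0 := by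
  obtain ⟨g1, g2, g3⟩ := outer_inv land land.length le_rfl
  have hn : 1 ≤ land.length := by
    cases land with
    | nil => exact absurd rfl h
    | cons a l => simp
  have hdef : solution land
      = (PySem.List.max? (PySem.List.pyGetD
          ((PySem.List.pyRange 0 (land.length : Int) 1).foldl stepA land)
          (((((PySem.List.pyRange 0 (land.length : Int) 1).foldl stepA land)).length : Int) - 1) [])
          (fun x => x)).getD 0 := rfl
  rw [hdef, g1, g3 hn, List.take_length]

-- ===== VERDICT (by name: the statement is the Claim_ definition above) =====
theorem solution_spec : Claim_equal_solution := by
  intro land _ hpre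
  unfold Spec_solution
  rw [solution_eq land hpre.1, solution_alt_eq]
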